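-- pv_equiv track=rewrite | github.com/encryptogroup/PrivMail | Sender-Client-Proxy/privmailcommons/shared.py | create_length_mask
-- ===== SOURCE A (Python) =====
-- def create_length_mask(keyword_length):
--     """Construct a length mask.
--
--     The length mask is an integer array where every integer represents a byte.
--     E.g., if the length is 9, this function returns [255, 128, 0, 0, 0, 0], which
--     is 1111 1111 1000 0000 00...00 in binary representation.
--     """
--     length_mask_helper_array = [0, 128, 192, 224, 240, 248, 252, 254, 255]
--     # Above follows from: [ 0, 2^7, 2^7 + 2^6, ..., 2^7 + 2^6 + 2^5 + 2^4 + 2^3 + 2^2 + 2^1 + 2^0 ]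
--     int_array = []
--
--     if keyword_length < 0:
--         raise Exception(f"Expected keyword_length to be greater or equal to 0: {keyword_length}")
--
--     while keyword_length >= 0:
--         if keyword_length < 8:
--             int_array.append(length_mask_helper_array[keyword_length])
--             break
--         int_array.append(length_mask_helper_array[8])
--         # update keyword length for next byte
--         keyword_length = keyword_length - 8
--
--     # In order to avoid revealing the length, we pad everything to 6 bytes
--     while len(int_array) < 6:
--         int_array.append(0)
--
--     return int_array
-- ===== SOURCE B (Python) =====
-- def create_length_mask(keyword_length):
--     """Construct a length mask (closed form: quotient/remainder instead of the subtract-by-8 loop)."""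
--     length_mask_helper_array = [0, 128, 192, 224, 240, 248, 252, 254, 255]
--     if keyword_length < 0:
--         raise Exception(f"Expected keyword_length to be greater or equal to 0: {keyword_length}")
--     full, rem = divmod(keyword_length, 8)
--     int_array = [255] * full + [length_mask_helper_array[rem]]
--     int_array += [0] * (6 - len(int_array))
--     return int_array
-- ===== Notes on version B (the rewrite author's own statement) =====
-- stated objective: simpler
-- what changed: Replaces A's iterative subtract-by-eight counting loop and its append-one-zero-at-a-time padding loop with a single divmod closed form plus one-shot list-repetition padding.
import Mathlib
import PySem

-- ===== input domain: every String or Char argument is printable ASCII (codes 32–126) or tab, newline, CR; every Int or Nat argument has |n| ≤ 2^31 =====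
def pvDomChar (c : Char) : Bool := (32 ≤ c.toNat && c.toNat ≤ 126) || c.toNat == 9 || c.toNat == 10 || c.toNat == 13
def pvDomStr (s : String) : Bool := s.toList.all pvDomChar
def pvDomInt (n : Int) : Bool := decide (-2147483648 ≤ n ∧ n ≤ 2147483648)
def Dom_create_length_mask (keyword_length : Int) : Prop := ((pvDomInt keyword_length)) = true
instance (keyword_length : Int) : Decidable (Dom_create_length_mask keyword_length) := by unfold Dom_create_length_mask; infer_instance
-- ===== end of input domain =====

-- B replaces A's subtract-by-8 loop and one-zero-at-a-time padding with a divmod closed form (simpler).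

-- ===== PORT A =====
def lenMaskHelper : List Int := [0, 128, 192, 224, 240, 248, 252, 254, 255]

-- A's while loop: append 255 and subtract 8 until keyword_length < 8.
def lmLoopA (k : Int) : List Int :=
  if k < 8 then [(PySem.List.pyGet? lenMaskHelper k).getD 0]
  else ((PySem.List.pyGet? lenMaskHelper 8).getD 0) :: lmLoopA (k - 8)
termination_by k.toNat
decreasing_by omega

-- A's padding while loop: append single zeros until length 6.
def lmPadA (xs : List Int) : List Int :=
  if xs.length < 6 then lmPadA (xs ++ [0]) else xs
termination_by 6 - xs.length
decreasing_by simp; omega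

def create_length_mask (keyword_length : Int) : List Int :=
  lmPadA (lmLoopA keyword_length)

-- ===== PORT B =====
def create_length_mask_alt (keyword_length : Int) : List Int :=
  let full := PySem.Int.floordiv keyword_length 8
  let rem := PySem.Int.mod keyword_length 8
  let arr := List.replicate full.toNat 255 ++ [(PySem.List.pyGet? lenMaskHelper rem).getD 0]
  arr ++ List.replicate (6 - arr.length) 0

-- ===== PRECONDITION & SPEC =====
-- On keyword_length < 0 the Python A raises Exception; Pre_ excludes exactly those inputs.
def Pre_create_length_mask (keyword_length : Int) : Prop := 0 ≤ keyword_length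
instance (keyword_length : Int) : Decidable (Pre_create_length_mask keyword_length) := by unfold Pre_create_length_mask; infer_instance
def pvWitness_create_length_mask : Int := 9

def Spec_create_length_mask (keyword_length : Int) (out : List Int) : Prop := out = create_length_mask_alt keyword_length
instance (keyword_length : Int) (out : List Int) : Decidable (Spec_create_length_mask keyword_length out) := by unfold Spec_create_length_mask; infer_instance

-- ===== CLAIM (what is proved, stated in full; the proofs are below) =====
def Claim_equal_create_length_mask : Prop := ∀ (keyword_length : Int), Dom_create_length_mask keyword_length → Pre_create_length_mask keyword_length → Spec_create_length_mask keyword_length (create_length_mask keyword_length)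

-- ===== LEMMAS AND PROOFS =====

-- A's subtract loop equals the divmod closed form.
lemma lmLoopA_eq (k : Int) (hk : 0 ≤ k) :
    lmLoopA k = List.replicate (PySem.Int.floordiv k 8).toNat 255
      ++ [(PySem.List.pyGet? lenMaskHelper (PySem.Int.mod k 8)).getD 0] := by
  rw [lmLoopA]
  rw [PySem.Int.floordiv_eq_ediv_of_pos (b := 8) (by norm_num),
      PySem.Int.mod_eq_emod_of_pos (b := 8) (by norm_num)]
  by_cases h : k < 8
  · rw [if_pos h]
    have h1 : k / 8 = 0 := by omega
    have h2 : k % 8 = k := by omega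
    rw [h1, h2]
    simp
  · rw [if_neg h]
    rw [lmLoopA_eq (k - 8) (by omega)]
    rw [PySem.Int.floordiv_eq_ediv_of_pos (b := 8) (by norm_num),
        PySem.Int.mod_eq_emod_of_pos (b := 8) (by norm_num)]
    have h1 : (k / 8).toNat = ((k - 8) / 8).toNat + 1 := by omega
    have h2 : k % 8 = (k - 8) % 8 := by omega
    rw [h1, h2, List.replicate_succ]
    simp
    decide
termination_by k.toNat
decreasing_by omega

-- A's padding loop appends the missing zeros in one block.
lemma lmPadA_eq (xs : List Int) : lmPadA xs = xs ++ List.replicate (6 - xs.length) 0 := by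
  rw [lmPadA]
  by_cases h : xs.length < 6
  · rw [if_pos h, lmPadA_eq (xs ++ [0])]
    have h1 : 6 - xs.length = (6 - (xs ++ [0]).length) + 1 := by simp; omega
    rw [h1, List.replicate_succ, List.append_assoc]
    simp
  · rw [if_neg h]
    have h1 : 6 - xs.length = 0 := by omega
    simp [h1]
termination_by 6 - xs.length
decreasing_by simp; omega

-- ===== VERDICT (by name: the statement is the Claim_ definition above) =====
theorem create_length_mask_spec : Claim_equal_create_length_mask := by
  intro k _ hk
  unfold Spec_create_length_mask create_length_mask create_length_mask_alt
  rw [lmPadA_eq, lmLoopA_eq k hk]
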